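-- pv_equiv track=rewrite | github.com/SamlKeller/CS | Unit 3/Red/red1.py | five_run
-- ===== SOURCE A (Python) =====
-- def five_run (ls):
--     brokeFive = False
--     lastFive = 0
--     for index, elm in enumerate(ls):
--         if (brokeFive == False):
--             if (elm >= 5):
--                 brokeFive = True
--             else:
--                 continue
--         if (elm % 5 == 0):
--             lastFive = elm
--         else:
--             ls[index] = lastFive
--     return ls
-- ===== SOURCE B (Python) =====
-- def five_run(ls):
--     # Phase 1: locate the start of the active region (first element >= 5).
--     start = next((i for i, x in enumerate(ls) if x >= 5), len(ls))
--     # Phase 2: rebuild the active region block-wise: repeatedly jump to the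
--     # next multiple of 5 and emit the gap before it as a replicated block.
--     ls[start:] = _fill_segments(ls[start:], 0)
--     return ls
--
-- def _fill_segments(seg, fill):
--     k = next((i for i, x in enumerate(seg) if x % 5 == 0), None)
--     if k is None:
--         return [fill] * len(seg)
--     return [fill] * k + [seg[k]] + _fill_segments(seg[k + 1:], seg[k])
-- ===== Notes on version B (the rewrite author's own statement) =====
-- stated objective: alternative
-- what changed: Replaces A's element-by-element pass carrying a brokeFive flag and lastFive state by a block-wise rebuild: find the start of the active region, then recursively jump to the next multiple of 5 and emit each gap as one replicated block [fill]*k.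
import Mathlib
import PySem

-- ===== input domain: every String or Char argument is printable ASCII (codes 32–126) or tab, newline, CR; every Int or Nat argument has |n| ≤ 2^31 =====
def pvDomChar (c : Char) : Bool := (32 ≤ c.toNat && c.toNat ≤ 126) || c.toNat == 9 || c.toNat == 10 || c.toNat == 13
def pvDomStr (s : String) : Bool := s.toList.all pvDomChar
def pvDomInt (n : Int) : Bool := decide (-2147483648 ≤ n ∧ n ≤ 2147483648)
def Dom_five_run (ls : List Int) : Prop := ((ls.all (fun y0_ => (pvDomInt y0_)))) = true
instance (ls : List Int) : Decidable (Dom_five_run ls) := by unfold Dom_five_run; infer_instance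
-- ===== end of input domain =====

-- B rebuilds the active region block-wise (replicated gap blocks between multiples of 5)
-- instead of A's element-wise flagged pass (objective: alternative).
-- Both Pythons mutate ls in place and return it; the equivalence proved is about the return value.

-- ===== PORT A =====
-- A's loop: state (brokeFive, lastFive) plus the list built so far (the write at the
-- current index only affects the already-visited position, so the loop is this fold).
def fiveStepA (st : Bool × Int × List Int) (elm : Int) : Bool × Int × List Int :=
  let broke := st.1
  let lastFive := st.2.1
  let acc := st.2.2
  if broke = false then
    if elm ≥ 5 then
      -- brokeFive := True, then fall through to the % 5 test
      if PySem.Int.mod elm 5 = 0 then (true, elm, acc ++ [elm])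
      else (true, lastFive, acc ++ [lastFive])
    else (broke, lastFive, acc ++ [elm])   -- continue
  else
    if PySem.Int.mod elm 5 = 0 then (true, elm, acc ++ [elm])
    else (true, lastFive, acc ++ [lastFive])

def five_run (ls : List Int) : List Int :=
  (ls.foldl fiveStepA (false, 0, [])).2.2

-- ===== PORT B =====
-- _fill_segments: next((i for i,x in enumerate(seg) if x%5==0), None) is findIdx?;
-- seg[k] is seg.getD k 0 (k is a valid index whenever findIdx? returns some k).
-- index returned by findIdx? is a valid index (cited by fillSegs' decreasing_by)
lemma findIdx?_lt_len {α : Type} (p : α → Bool) : ∀ (xs : List α) (k : Nat), xs.findIdx? p = some k → k < xs.length := by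
  intro xs
  induction xs with
  | nil => intro k h; simp at h
  | cons x xs ih =>
      intro k h
      rw [List.findIdx?_cons] at h
      by_cases hp : p x
      · simp [hp] at h
        simp only [List.length_cons]
        omega
      · simp [hp] at h
        obtain ⟨n, hn, hk⟩ := h
        have := ih n hn
        simp only [List.length_cons]
        omega

def fillSegs (seg : List Int) (fill : Int) : List Int :=
  match hidx : seg.findIdx? (fun x => PySem.Int.mod x 5 == 0) with
  | none => List.replicate seg.length fill
  | some k =>
      List.replicate k fill ++ [seg.getD k 0] ++ fillSegs (seg.drop (k + 1)) (seg.getD k 0)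
termination_by seg.length
decreasing_by
  have hk : k < seg.length := findIdx?_lt_len _ seg k hidx
  simp [List.length_drop]; omega

-- five_run (B): next((i for i,x in enumerate(ls) if x>=5), len(ls)) is findIdx
-- (which returns the length when no element matches); ls[start:] = _fill_segments(ls[start:], 0).
def five_run_alt (ls : List Int) : List Int :=
  let start := ls.findIdx (fun x => decide (5 ≤ x))
  ls.take start ++ fillSegs (ls.drop start) 0

-- ===== PRECONDITION & SPEC =====
def Spec_five_run (ls : List Int) (out : List Int) : Prop := out = five_run_alt ls
instance (ls : List Int) (out : List Int) : Decidable (Spec_five_run ls out) := by unfold Spec_five_run; infer_instance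

-- ===== CLAIM (what is proved, stated in full; the proofs are below) =====
def Claim_equal_five_run : Prop := ∀ (ls : List Int), Dom_five_run ls → Spec_five_run ls (five_run ls)

-- ===== LEMMAS AND PROOFS =====
-- Common reference program: the two-phase recursive description both ports are reduced to.
def fiveProcess (lastFive : Int) : List Int → List Int
  | [] => []
  | x :: xs => if PySem.Int.mod x 5 = 0 then x :: fiveProcess x xs
               else lastFive :: fiveProcess lastFive xs

def fiveFind : List Int → List Int
  | [] => []
  | x :: xs => if x ≥ 5 then fiveProcess 0 (x :: xs) else x :: fiveFind xs

lemma foldA_broke (xs : List Int) : ∀ (lastFive : Int) (acc : List Int),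
    (xs.foldl fiveStepA (true, lastFive, acc)).2.2 = acc ++ fiveProcess lastFive xs := by
  induction xs with
  | nil => intro lastFive acc; simp [fiveProcess]
  | cons x xs ih =>
      intro lastFive acc
      by_cases h : (5:Int) ∣ x <;>
        simp [List.foldl, fiveStepA, fiveProcess, h, ih]

lemma foldA_seek (xs : List Int) : ∀ (acc : List Int),
    (xs.foldl fiveStepA (false, 0, acc)).2.2 = acc ++ fiveFind xs := by
  induction xs with
  | nil => intro acc; simp [fiveFind]
  | cons x xs ih =>
      intro acc
      by_cases hge : x ≥ 5
      · by_cases h : (5:Int) ∣ x <;>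
          simp [List.foldl, fiveStepA, fiveFind, fiveProcess, hge, h, foldA_broke]
      · simp [List.foldl, fiveStepA, fiveFind, hge, ih]

lemma mod5_true (x : Int) (h : (5:Int) ∣ x) : (PySem.Int.mod x 5 == 0) = true := by
  simp [h]

lemma mod5_false (x : Int) (h : ¬ (5:Int) ∣ x) : (PySem.Int.mod x 5 == 0) = false := by
  simp [h]

lemma findIdx5_cons_pos (x : Int) (xs : List Int) (h : (5:Int) ∣ x) :
    (x :: xs).findIdx? (fun x => PySem.Int.mod x 5 == 0) = some 0 := by
  rw [List.findIdx?_cons, mod5_true x h]; rfl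

lemma findIdx5_cons_neg (x : Int) (xs : List Int) (h : ¬ (5:Int) ∣ x) :
    (x :: xs).findIdx? (fun x => PySem.Int.mod x 5 == 0)
      = (xs.findIdx? (fun x => PySem.Int.mod x 5 == 0)).map (· + 1) := by
  rw [List.findIdx?_cons, mod5_false x h]; rfl

lemma fillSegs_eq_none (xs : List Int) (fill : Int)
    (hx : xs.findIdx? (fun x => PySem.Int.mod x 5 == 0) = none) :
    fillSegs xs fill = List.replicate xs.length fill := by
  rw [fillSegs]
  split
  · rfl
  · rename_i k heq; rw [hx] at heq; cases heq

lemma fillSegs_eq_some (xs : List Int) (fill : Int) (k : Nat)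
    (hx : xs.findIdx? (fun x => PySem.Int.mod x 5 == 0) = some k) :
    fillSegs xs fill
      = List.replicate k fill ++ [xs.getD k 0] ++ fillSegs (xs.drop (k + 1)) (xs.getD k 0) := by
  rw [fillSegs]
  split
  · rename_i heq; rw [hx] at heq; cases heq
  · rename_i k' heq
    rw [hx] at heq
    injection heq with hk
    subst hk
    rfl

lemma fillSegs_cons_pos (x : Int) (xs : List Int) (fill : Int)
    (h : (5:Int) ∣ x) : fillSegs (x :: xs) fill = x :: fillSegs xs x := by
  rw [fillSegs_eq_some (x :: xs) fill 0 (findIdx5_cons_pos x xs h)]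
  simp [List.getD]

lemma fillSegs_cons_neg (x : Int) (xs : List Int) (fill : Int)
    (h : ¬ (5:Int) ∣ x) : fillSegs (x :: xs) fill = fill :: fillSegs xs fill := by
  cases hx : xs.findIdx? (fun x => PySem.Int.mod x 5 == 0) with
  | none =>
      rw [fillSegs_eq_none (x :: xs) fill (by rw [findIdx5_cons_neg x xs h, hx]; rfl),
          fillSegs_eq_none xs fill hx]
      simp [List.replicate_succ]
  | some n =>
      rw [fillSegs_eq_some (x :: xs) fill (n + 1) (by rw [findIdx5_cons_neg x xs h, hx]; rfl),
          fillSegs_eq_some xs fill n hx]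
      simp [List.replicate_succ, List.getD]

lemma fillSegs_eq_fiveProcess (xs : List Int) : ∀ (fill : Int),
    fillSegs xs fill = fiveProcess fill xs := by
  induction xs with
  | nil => intro fill; rw [fillSegs_eq_none [] fill (by simp)]; simp [fiveProcess]
  | cons x xs ih =>
      intro fill
      by_cases h : (5:Int) ∣ x
      · rw [fillSegs_cons_pos x xs fill h]
        simp [fiveProcess, h, ih]
      · rw [fillSegs_cons_neg x xs fill h]
        simp [fiveProcess, h, ih]

lemma alt_eq_fiveFind (ls : List Int) : five_run_alt ls = fiveFind ls := by
  induction ls with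
  | nil => simp [five_run_alt, fiveFind, fillSegs_eq_none [] 0 (by simp)]
  | cons x xs ih =>
      by_cases hge : (5:Int) ≤ x
      · simp [five_run_alt, fiveFind, List.findIdx_cons, hge, fillSegs_eq_fiveProcess]
      · simp [five_run_alt, fiveFind, List.findIdx_cons, hge] at ih ⊢
        exact ih

-- ===== VERDICT (by name: the statement is the Claim_ definition above) =====
theorem five_run_spec : Claim_equal_five_run := by
  intro ls _
  show five_run ls = five_run_alt ls
  rw [alt_eq_fiveFind]
  simpa [five_run] using foldA_seek ls []
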